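-- pv_equiv track=rewrite | github.com/danieleschmidt/embodied-ai-benchmark | src/embodied_ai_benchmark/research/emergent_swarm_coordination.py | _roles_complementary
-- ===== SOURCE A (Python) =====
-- from typing import Dict, List, Optional, Tuple, Any, Set
--
-- def _roles_complementary(role_a: Optional[str], role_b: Optional[str]) -> bool:
--     """Check if two roles are complementary."""
--     if not role_a or not role_b:
--         return False
--
--     complementary_pairs = [
--         ('leader', 'follower'),
--         ('scout', 'coordinator'),
--         ('resource_gatherer', 'transporter'),
--         ('guard', 'worker')
--     ]
--
--     for pair in complementary_pairs:
--         if (role_a in pair and role_b in pair) and role_a != role_b: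
--             return True
--
--     return False
-- ===== SOURCE B (Python) =====
-- # B: map each role to its position in a canonical ordering where complements are
-- # adjacent (positions 2k and 2k+1), then decide by index arithmetic: same block,
-- # different slot.
-- _ROLE_ORDER = ('leader', 'follower',
--                'scout', 'coordinator',
--                'resource_gatherer', 'transporter',
--                'guard', 'worker')
--
-- def _roles_complementary(role_a, role_b):
--     """Check if two roles are complementary."""
--     if not role_a or not role_b:
--         return False
--     try:
--         i = _ROLE_ORDER.index(role_a)
--         j = _ROLE_ORDER.index(role_b)
--     except ValueError:
--         return False
--     return i != j and i // 2 == j // 2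
-- ===== Notes on version B (the rewrite author's own statement) =====
-- stated objective: alternative
-- what changed: Instead of scanning pairs with membership tests, B maps both roles to indices in one canonical role ordering where complements are adjacent and decides by arithmetic: the indices differ but share the same block (i // 2 == j // 2).
import Mathlib
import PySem

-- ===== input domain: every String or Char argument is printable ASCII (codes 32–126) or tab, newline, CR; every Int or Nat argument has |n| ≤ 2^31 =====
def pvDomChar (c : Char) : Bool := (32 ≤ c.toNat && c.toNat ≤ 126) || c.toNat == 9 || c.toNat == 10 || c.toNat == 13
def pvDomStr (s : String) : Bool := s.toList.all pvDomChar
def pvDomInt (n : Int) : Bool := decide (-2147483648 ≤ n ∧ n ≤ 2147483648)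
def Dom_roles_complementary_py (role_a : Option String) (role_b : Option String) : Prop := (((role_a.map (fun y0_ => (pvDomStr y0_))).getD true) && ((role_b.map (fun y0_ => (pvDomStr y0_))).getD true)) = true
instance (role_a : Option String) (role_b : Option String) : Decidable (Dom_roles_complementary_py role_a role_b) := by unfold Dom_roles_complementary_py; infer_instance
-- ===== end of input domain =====

-- B replaces A's scan over pairs (with in-tuple membership tests) by mapping both
-- roles to indices in one canonical role ordering where complements are adjacent and
-- deciding by arithmetic (alternative decomposition; return-value equivalence proved).

-- ===== PORT A =====
def pvPairs : List (String × String) :=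
  [("leader", "follower"), ("scout", "coordinator"),
   ("resource_gatherer", "transporter"), ("guard", "worker")]

-- the 'for pair in complementary_pairs' loop with its early return
def pvALoop (a b : String) : List (String × String) → Bool
  | [] => false
  | p :: rest =>
      if ((a == p.1 || a == p.2) && (b == p.1 || b == p.2)) && a != b then true
      else pvALoop a b rest

def roles_complementary_py (role_a : Option String) (role_b : Option String) : Bool :=
  match role_a, role_b with
  | some a, some b => if a == "" || b == "" then false else pvALoop a b pvPairs
  | _, _ => false   -- 'not role_a or not role_b' guard: None or empty string is falsy

-- ===== PORT B =====
def pvRoleOrder : List String :=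
  ["leader", "follower", "scout", "coordinator",
   "resource_gatherer", "transporter", "guard", "worker"]

-- 'try: i = _ROLE_ORDER.index(role_a); j = _ROLE_ORDER.index(role_b) except ValueError:
--  return False' then 'return i != j and i // 2 == j // 2' (indices are nonnegative, so
-- Python's // is Nat division here)
def pvIndexCore (a b : String) : Bool :=
  (((PySem.List.index? pvRoleOrder a).bind fun i =>
      (PySem.List.index? pvRoleOrder b).map fun j =>
        i != j && (i / 2 == j / 2))).getD false

-- 'not role_a or not role_b' guard: None or "" is falsy (getD "" folds both cases)
def roles_complementary_py_alt (role_a : Option String) (role_b : Option String) : Bool :=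
  if role_a.getD "" == "" || role_b.getD "" == "" then false
  else pvIndexCore (role_a.getD "") (role_b.getD "")

-- ===== PRECONDITION & SPEC =====
def Spec_roles_complementary_py (role_a : Option String) (role_b : Option String) (out : Bool) : Prop := out = roles_complementary_py_alt role_a role_b
instance (role_a : Option String) (role_b : Option String) (out : Bool) : Decidable (Spec_roles_complementary_py role_a role_b out) := by unfold Spec_roles_complementary_py; infer_instance

-- ===== CLAIM =====
def Claim_equal_roles_complementary_py : Prop := ∀ (role_a : Option String) (role_b : Option String), Dom_roles_complementary_py role_a role_b → Spec_roles_complementary_py role_a role_b (roles_complementary_py role_a role_b)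

-- ===== LEMMAS AND PROOFS =====
lemma pv_core_none_left (a b : String) (h : PySem.List.index? pvRoleOrder a = none) :
    pvIndexCore a b = false := by
  simp only [PySem.List.index?_eq_idxOf?] at h
  simp [pvIndexCore, h]

lemma pv_core_none_right (a b : String) (h : PySem.List.index? pvRoleOrder b = none) :
    pvIndexCore a b = false := by
  simp only [PySem.List.index?_eq_idxOf?] at h
  simp [pvIndexCore, h]

lemma pv_aloop_false_of_a (a b : String) (h : a ∉ pvRoleOrder) :
    pvALoop a b pvPairs = false := by
  simp [pvRoleOrder] at h
  obtain ⟨h1, h2, h3, h4, h5, h6, h7, h8⟩ := h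
  simp [pvALoop, pvPairs, h1, h2, h3, h4, h5, h6, h7, h8]

lemma pv_aloop_false_of_b (a b : String) (h : b ∉ pvRoleOrder) :
    pvALoop a b pvPairs = false := by
  simp [pvRoleOrder] at h
  obtain ⟨h1, h2, h3, h4, h5, h6, h7, h8⟩ := h
  simp [pvALoop, pvPairs, h1, h2, h3, h4, h5, h6, h7, h8]

lemma pv_core (a b : String) : pvALoop a b pvPairs = pvIndexCore a b := by
  by_cases ha : a ∈ pvRoleOrder
  · by_cases hb : b ∈ pvRoleOrder
    · simp only [pvRoleOrder, List.mem_cons, List.not_mem_nil, or_false] at ha hb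
      rcases ha with rfl | rfl | rfl | rfl | rfl | rfl | rfl | rfl <;>
        rcases hb with rfl | rfl | rfl | rfl | rfl | rfl | rfl | rfl <;> decide
    · rw [pv_aloop_false_of_b a b hb,
          pv_core_none_right a b ((PySem.List.index?_eq_none_iff _ _).mpr hb)]
  · rw [pv_aloop_false_of_a a b ha,
        pv_core_none_left a b ((PySem.List.index?_eq_none_iff _ _).mpr ha)]

-- ===== VERDICT =====
theorem roles_complementary_py_spec : Claim_equal_roles_complementary_py := by
  intro role_a role_b _
  unfold Spec_roles_complementary_py roles_complementary_py roles_complementary_py_alt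
  cases role_a <;> cases role_b <;> simp [pv_core]
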